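-- pv_equiv track=rewrite | github.com/realmstoriches/Realms | agentic_bridge/alpha_to_beta_sync.py | should_exclude
-- ===== SOURCE A (Python) =====
-- EXCLUDE = {'.git', '__pycache__', 'node_modules', '.env', '.env.*', '*.txt'}
--
-- def should_exclude(name):
--     for pattern in EXCLUDE:
--         if pattern.startswith('*') and name.endswith(pattern[1:]):
--             return True
--         if pattern.endswith('*') and name.startswith(pattern[:-1]):
--             return True
--         if name == pattern:
--             return True
--     return False
-- ===== SOURCE B (Python) =====
-- # Closed-form of the fixed pattern set: one boolean expression, no per-pattern loop.
-- _EXACT = frozenset({'.git', '__pycache__', 'node_modules', '.env'})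
--
-- def should_exclude(name):
--     return name.endswith('.txt') or name.startswith('.env.') or name in _EXACT
-- ===== Notes on version B (the rewrite author's own statement) =====
-- stated objective: simpler
-- what changed: Replaced the per-pattern loop with startswith/endswith/equality branches by a single precomputed closed-form test: the one suffix pattern, the one prefix pattern, and a frozenset membership for the literal names.
import Mathlib
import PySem

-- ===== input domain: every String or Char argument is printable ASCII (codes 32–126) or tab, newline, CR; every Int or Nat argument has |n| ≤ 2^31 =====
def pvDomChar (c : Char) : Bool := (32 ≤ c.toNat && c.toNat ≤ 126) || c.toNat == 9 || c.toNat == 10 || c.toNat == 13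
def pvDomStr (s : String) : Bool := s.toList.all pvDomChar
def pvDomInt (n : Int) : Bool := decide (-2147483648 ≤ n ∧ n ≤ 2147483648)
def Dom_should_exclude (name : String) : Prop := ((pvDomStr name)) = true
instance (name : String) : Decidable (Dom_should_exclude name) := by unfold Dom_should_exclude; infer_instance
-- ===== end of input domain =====

-- B replaces A's per-pattern loop with one closed-form boolean expression (simpler).

-- ===== PORT A =====
-- the module-level EXCLUDE set (Python set of string literals; iteration order fixed here)
def pvExclude : List String := [".git", "__pycache__", "node_modules", ".env", ".env.*", "*.txt"]

-- the `for pattern in EXCLUDE` loop with its three early-return branches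
def should_exclude_go (name : String) : List String → Bool
  | [] => false
  | pattern :: rest =>
    if PySem.Str.startswith pattern "*" && PySem.Str.endswith name (PySem.Str.slice pattern (some 1) none) then
      true
    else if PySem.Str.endswith pattern "*" && PySem.Str.startswith name (PySem.Str.slice pattern none (some (-1))) then
      true
    else if name = pattern then
      true
    else
      should_exclude_go name rest

def should_exclude (name : String) : Bool :=
  should_exclude_go name pvExclude

-- ===== PORT B =====
-- the frozenset of exact names
def pvExact : List String := [".git", "__pycache__", "node_modules", ".env"]

def should_exclude_alt (name : String) : Bool :=
  PySem.Str.endswith name ".txt" || PySem.Str.startswith name ".env." || pvExact.contains name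

-- ===== PRECONDITION & SPEC =====
def Spec_should_exclude (name : String) (out : Bool) : Prop := out = should_exclude_alt name
instance (name : String) (out : Bool) : Decidable (Spec_should_exclude name out) := by unfold Spec_should_exclude; infer_instance

-- ===== CLAIM (what is proved, stated in full; the proofs are below) =====
def Claim_equal_should_exclude : Prop := ∀ (name : String), Dom_should_exclude name → Spec_should_exclude name (should_exclude name)

-- ===== LEMMAS AND PROOFS =====

-- ===== VERDICT (by name: the statement is the Claim_ definition above) =====
theorem should_exclude_spec : Claim_equal_should_exclude := by
  intro name _
  unfold Spec_should_exclude should_exclude pvExclude should_exclude_alt pvExact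
  by_cases h1 : name = ".env.*"
  · subst h1; decide
  · by_cases h2 : name = "*.txt"
    · subst h2; decide
    · simp only [List.contains_eq_mem, List.mem_cons, List.not_mem_nil]
      simp [should_exclude_go, PySem.Str.startswith, PySem.Chars.startswith, PySem.Str.endswith,
            PySem.Chars.endswith, PySem.Str.slice, PySem.List.slice, h1, h2,
            List.isSuffixOf, List.isPrefixOf]
      have hd : ∀ (a b : List Char), a.isPrefixOf b = decide (a <+: b) := by
        intro a b
        by_cases h : a <+: b <;> simp [h, List.isPrefixOf_iff_prefix, Bool.eq_false_iff, ne_eq]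
      simp only [hd]
      ac_rfl
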